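-- pv_equiv track=rewrite | github.com/MrBrantCode/unitest_baseline | mut_generate/mist_train_cf/cf_8040/solution.py | count_o
-- ===== SOURCE A (Python) =====
-- def count_o(s):
--     """
--     This function takes a string as input and returns the number of times the letter "o" appears,
--     excluding any occurrences within quotation marks and any occurrences that are immediately
--     preceded by the letter "l". The function handles both single and double quotation marks.
--
--     Parameters:
--     s (str): The input string.
--
--     Returns:
--     int: The number of times the letter "o" appears in the string, excluding any occurrences within
--     quotation marks and any occurrences that are immediately preceded by the letter "l".
--     """
--     count = 0
--     in_quotes = False
--     prev_l = False
--     for char in s: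
--         if char in ['"', "'"] and not in_quotes:
--             in_quotes = True
--         elif char in ['"', "'"] and in_quotes:
--             in_quotes = False
--         elif char == 'o' and not in_quotes and not prev_l:
--             count += 1
--         prev_l = (char == 'l')
--     return count
-- ===== SOURCE B (Python) =====
-- def count_o(s):
--     # Two-pass: prefix table of quote counts, then a zip over (char, parity, previous char).
--     pref = []
--     q = 0
--     for c in s:
--         pref.append(q)
--         q += c in '"\''
--     return sum(c == 'o' and p % 2 == 0 and prev != 'l'
--                for c, p, prev in zip(s, pref, ' ' + s))
-- ===== Notes on version B (the rewrite author's own statement) =====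
-- stated objective: alternative
-- what changed: Replaces A's single stateful scan (in_quotes/prev_l flags updated per character) by two passes: first build a prefix table of cumulative quote counts, then sum over zip(s, prefix, ' '+s) testing even quote parity and previous character != 'l'.
import Mathlib
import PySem

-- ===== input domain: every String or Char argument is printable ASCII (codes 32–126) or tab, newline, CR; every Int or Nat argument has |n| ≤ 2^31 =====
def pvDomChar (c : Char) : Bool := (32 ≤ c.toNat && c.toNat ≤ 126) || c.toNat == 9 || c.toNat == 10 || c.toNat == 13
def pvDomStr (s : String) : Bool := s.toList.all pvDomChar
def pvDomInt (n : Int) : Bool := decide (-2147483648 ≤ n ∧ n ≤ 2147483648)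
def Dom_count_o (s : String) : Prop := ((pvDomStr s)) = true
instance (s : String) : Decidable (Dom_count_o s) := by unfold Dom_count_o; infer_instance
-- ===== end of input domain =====

-- B replaces A's single stateful scan by two passes (a prefix table of quote counts, then a
-- zip over (char, parity, previous char)); objective: alternative decomposition, same cost.

-- ===== PORT A =====
-- state: (count, in_quotes, prev_l), exactly A's loop
def count_o (s : String) : Int :=
  (s.toList.foldl
    (fun (st : Int × Bool × Bool) char =>
      if (char = '"' ∨ char = '\'') ∧ st.2.1 = false then
        (st.1, true, char = 'l')
      else if (char = '"' ∨ char = '\'') ∧ st.2.1 = true then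
        (st.1, false, char = 'l')
      else if char = 'o' ∧ st.2.1 = false ∧ st.2.2 = false then
        (st.1 + 1, st.2.1, char = 'l')
      else
        (st.1, st.2.1, char = 'l'))
    (0, false, false)).1

-- ===== PORT B =====
-- first pass of Source B: build pref (list of cumulative quote counts before each position)
def pvPrefB (cs : List Char) (q : Nat) : List Nat × Nat :=
  cs.foldl (fun (st : List Nat × Nat) c =>
    (st.1 ++ [st.2], st.2 + (if c = '"' ∨ c = '\'' then 1 else 0))) ([], q)

def count_o_alt (s : String) : Int :=
  let cs := s.toList
  let pref := (pvPrefB cs 0).1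
  -- second pass of Source B: sum over zip(s, pref, ' ' + s)
  (List.zipWith3
    (fun c p prev => if c = 'o' ∧ p % 2 = 0 ∧ prev ≠ 'l' then (1 : Int) else 0)
    cs pref (' ' :: cs)).sum

-- ===== PRECONDITION & SPEC =====
def Spec_count_o (s : String) (out : Int) : Prop := out = count_o_alt s
instance (s : String) (out : Int) : Decidable (Spec_count_o s out) := by unfold Spec_count_o; infer_instance

-- ===== CLAIM (what is proved, stated in full; the proofs are below) =====
def Claim_equal_count_o : Prop := ∀ (s : String), Dom_count_o s → Spec_count_o s (count_o s)

-- ===== LEMMAS AND PROOFS =====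

-- common recursive characterisation of the count
def pvRec : List Char → Bool → Bool → Int
  | [], _, _ => 0
  | c :: t, inq, prevl =>
    if c = '"' ∨ c = '\'' then pvRec t (!inq) (c = 'l')
    else if c = 'o' ∧ inq = false ∧ prevl = false then 1 + pvRec t inq (c = 'l')
    else pvRec t inq (c = 'l')

theorem pvA_foldl (t : List Char) : ∀ (count : Int) (inq prevl : Bool),
    (t.foldl
      (fun (st : Int × Bool × Bool) char =>
        if (char = '"' ∨ char = '\'') ∧ st.2.1 = false then
          (st.1, true, char = 'l')
        else if (char = '"' ∨ char = '\'') ∧ st.2.1 = true then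
          (st.1, false, char = 'l')
        else if char = 'o' ∧ st.2.1 = false ∧ st.2.2 = false then
          (st.1 + 1, st.2.1, char = 'l')
        else
          (st.1, st.2.1, char = 'l'))
      (count, inq, prevl)).1 = count + pvRec t inq prevl := by
  induction t with
  | nil => intro count inq prevl; simp [pvRec]
  | cons c t ih =>
    intro count inq prevl
    simp only [List.foldl_cons, pvRec]
    by_cases hq : c = '"' ∨ c = '\''
    · cases inq <;> simp [hq, ih]
    · by_cases ho : c = 'o' ∧ inq = false ∧ prevl = false
      · simp [ho, ih]; ring
      · simp [hq, ho, ih]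

theorem pvPrefB_acc (t : List Char) : ∀ (a : List Nat) (q : Nat),
    (t.foldl (fun (st : List Nat × Nat) c =>
      (st.1 ++ [st.2], st.2 + (if c = '"' ∨ c = '\'' then 1 else 0))) (a, q)).1
    = a ++ (pvPrefB t q).1 := by
  induction t with
  | nil => intro a q; simp [pvPrefB]
  | cons c t ih =>
    intro a q
    simp only [List.foldl_cons, pvPrefB] at *
    rw [ih, ih ([] ++ [q])]
    simp

theorem pvPrefB_cons (c : Char) (t : List Char) (q : Nat) :
    (pvPrefB (c :: t) q).1
      = q :: (pvPrefB t (q + (if c = '"' ∨ c = '\'' then 1 else 0))).1 := by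
  simp only [pvPrefB, List.foldl_cons]
  rw [pvPrefB_acc]
  simp [pvPrefB]

theorem pvB_rec (t : List Char) : ∀ (q : Nat) (prev : Char),
    (List.zipWith3
      (fun c p prev => if c = 'o' ∧ p % 2 = 0 ∧ prev ≠ 'l' then (1 : Int) else 0)
      t (pvPrefB t q).1 (prev :: t)).sum
    = pvRec t (decide (q % 2 = 1)) (decide (prev = 'l')) := by
  induction t with
  | nil => intro q prev; simp [pvRec, List.zipWith3]
  | cons c t ih =>
    intro q prev
    rw [pvPrefB_cons]
    simp only [List.zipWith3, List.sum_cons, pvRec, ih]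
    by_cases hq : c = '"' ∨ c = '\''
    · have hco : ¬ c = 'o' := by rcases hq with h | h <;> subst h <;> decide
      have hpar : decide ((q + 1) % 2 = 1) = !decide (q % 2 = 1) := by
        rcases Nat.mod_two_eq_zero_or_one q with h | h <;> simp [Nat.add_mod, h]
      simp [hq, hco, hpar]
    · by_cases ho : c = 'o'
      · subst ho
        by_cases hp : q % 2 = 0
        · have : ¬ q % 2 = 1 := by omega
          by_cases hl : prev = 'l' <;> simp [hp, hl]
        · have : q % 2 = 1 := by omega
          simp [this]
      · simp [hq, ho]

-- ===== VERDICT (by name: the statement is the Claim_ definition above) =====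
theorem count_o_spec : Claim_equal_count_o := by
  intro s _
  unfold Spec_count_o count_o count_o_alt
  rw [pvA_foldl, pvB_rec]
  simp
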